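-- pv_equiv track=rewrite | github.com/Yash9988/self-learn | leetcode/1652.py | decrypt_op
-- ===== SOURCE A (Python) =====
-- def decrypt_op(code: list[int], k: int) -> list[int]:
--     n = len(code)                                                   # Compute the length of the list
--
--     if k == 0:                                                      # Check if k is zero
--         return [0] * n                                              # Return a list of zeros
--
--     result = [0] * n                                                # Initialize the result list.
--
--     start, end, step = (1, k + 1, 1) if k > 0 else (k, 0, 1)        # Determine the direction of the sliding window
--     window_sum = sum(code[i % n] for i in range(start, end))        # Initialize the first window sum
--
--     for i in range(n):                                              # Iterate through the list elements
--         result[i] = window_sum                                      # Store the current window sum in the result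
--
--         window_sum -= code[(i + start) % n]                         # Remove outgoing element
--         window_sum += code[(i + end) % n]                           # Add incoming element
--
--     return result                                                   # Return the result list
-- ===== SOURCE B (Python) =====
-- def decrypt_op(code: list[int], k: int) -> list[int]:
--     n = len(code)
--     if k == 0:
--         return [0] * n
--     js = range(1, k + 1) if k > 0 else range(k, 0)
--     return [sum(code[(i + j) % n] for j in js) for i in range(n)]
-- ===== Notes on version B (the rewrite author's own statement) =====
-- stated objective: simpler
-- what changed: Replaces the running sliding-window sum with a direct brute-force recomputation: each output element is the sum of the k neighbouring elements taken with modular indexing, no window state maintained.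
import Mathlib
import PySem

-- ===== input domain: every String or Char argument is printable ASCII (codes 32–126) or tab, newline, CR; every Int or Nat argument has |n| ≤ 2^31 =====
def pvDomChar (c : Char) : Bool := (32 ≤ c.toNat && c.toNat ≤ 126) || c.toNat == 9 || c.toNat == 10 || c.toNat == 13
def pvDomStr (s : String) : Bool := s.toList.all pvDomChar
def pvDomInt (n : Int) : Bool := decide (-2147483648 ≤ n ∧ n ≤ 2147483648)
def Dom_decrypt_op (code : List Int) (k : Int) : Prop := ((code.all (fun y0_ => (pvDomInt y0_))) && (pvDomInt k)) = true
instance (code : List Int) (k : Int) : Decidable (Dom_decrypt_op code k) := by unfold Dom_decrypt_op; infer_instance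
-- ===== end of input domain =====

-- B replaces A's O(n+|k|) sliding-window running sum with the direct O(n*|k|) brute-force
-- recomputation (each output summed from scratch with modular indexing): simpler, not faster.

-- ===== PORT A =====
-- A's sliding window: initial window sum over range(start,end), then one pass
-- subtracting the outgoing and adding the incoming element.
def decrypt_op (code : List Int) (k : Int) : List Int :=
  let n : Int := code.length
  if k = 0 then List.replicate code.length 0
  else
    let se : Int × Int := if k > 0 then (1, k + 1) else (k, 0)
    let windowSum : Int := ((PySem.List.pyRange se.1 se.2 1).map
      (fun i => PySem.List.pyGetD code (PySem.Int.mod i n) 0)).foldl (· + ·) 0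
    ((PySem.List.pyRange 0 n 1).foldl
      (fun (acc : List Int × Int) (i : Int) =>
        (acc.1 ++ [acc.2],
         acc.2 - PySem.List.pyGetD code (PySem.Int.mod (i + se.1) n) 0
               + PySem.List.pyGetD code (PySem.Int.mod (i + se.2) n) 0))
      ([], windowSum)).1

-- ===== PORT B =====
-- brute force: result[i] = sum of code[(i+j) % n] over the window offsets j
def decrypt_op_alt (code : List Int) (k : Int) : List Int :=
  let n : Int := code.length
  if k = 0 then List.replicate code.length 0
  else
    let js := if k > 0 then PySem.List.pyRange 1 (k + 1) 1 else PySem.List.pyRange k 0 1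
    (PySem.List.pyRange 0 n 1).map (fun i =>
      (js.map (fun j => PySem.List.pyGetD code (PySem.Int.mod (i + j) n) 0)).foldl (· + ·) 0)

-- ===== PRECONDITION & SPEC =====
-- Pre_ excludes empty code with k ≠ 0, where A raises ZeroDivisionError (i % 0).
def Pre_decrypt_op (code : List Int) (k : Int) : Prop := code ≠ [] ∨ k = 0
instance (code : List Int) (k : Int) : Decidable (Pre_decrypt_op code k) := by unfold Pre_decrypt_op; infer_instance
def pvWitness_decrypt_op : List Int × Int := ([5, 7, 1, 4], 3)

def Spec_decrypt_op (code : List Int) (k : Int) (out : List Int) : Prop := out = decrypt_op_alt code k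
instance (code : List Int) (k : Int) (out : List Int) : Decidable (Spec_decrypt_op code k out) := by unfold Spec_decrypt_op; infer_instance

-- ===== CLAIM (what is proved, stated in full; the proofs are below) =====
def Claim_equal_decrypt_op : Prop := ∀ (code : List Int) (k : Int), Dom_decrypt_op code k → Pre_decrypt_op code k → Spec_decrypt_op code k (decrypt_op code k)

-- ===== LEMMAS AND PROOFS =====

-- sum() was ported as a left fold (stack-safe); it is List.sum
theorem foldl_add_eq_sum (xs : List Int) : xs.foldl (· + ·) 0 = xs.sum := by
  rw [List.sum_eq_foldl]


-- telescoping: shifting a window of m consecutive offsets by one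
theorem window_shift' (g : Int → Int) (m : Nat) :
    ∀ (s i : Int),
    ((PySem.List.pyRange s (s + (m : Int)) 1).map (fun j => g (i + 1 + j))).sum
      = ((PySem.List.pyRange s (s + (m : Int)) 1).map (fun j => g (i + j))).sum
        - g (i + s) + g (i + (s + (m : Int))) := by
  induction m with
  | zero =>
    intro s i
    rw [PySem.List.pyRange_one_eq_nil (by omega)]
    simp
  | succ m ih =>
    intro s i
    rw [show PySem.List.pyRange s (s + ((m + 1 : Nat) : Int)) 1
        = s :: PySem.List.pyRange (s + 1) (s + ((m + 1 : Nat) : Int)) 1 from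
      PySem.List.pyRange_one_cons (by push_cast; omega)]
    have hb : s + ((m + 1 : Nat) : Int) = (s + 1) + ((m : Nat) : Int) := by push_cast; ring
    rw [hb, List.map_cons, List.map_cons, List.sum_cons, List.sum_cons, ih (s + 1) i]
    have h1 : i + 1 + s = i + (s + 1) := by ring
    have h2 : i + ((s + 1) + (m : Int)) = i + (s + ((m + 1 : Nat) : Int)) := by push_cast; ring
    rw [h1, h2]
    ring

-- telescoping for an arbitrary window [s, e), s ≤ e
theorem window_shift (g : Int → Int) (s e i : Int) (hse : s ≤ e) :
    ((PySem.List.pyRange s e 1).map (fun j => g (i + 1 + j))).sum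
      = ((PySem.List.pyRange s e 1).map (fun j => g (i + j))).sum - g (i + s) + g (i + e) := by
  have he : e = s + (((e - s).toNat : Nat) : Int) := by omega
  rw [he]
  exact window_shift' g (e - s).toNat s i

-- the fold invariant: starting at index i with accumulator (res, S i), the loop
-- appends S i, S (i+1), …, S (n-1)
theorem loop_inv (g : Int → Int) (s e n : Int) (hse : s ≤ e) (m : Nat) :
    ∀ (i : Int) (res : List Int), i + (m : Int) = n →
    ((PySem.List.pyRange i n 1).foldl
      (fun (acc : List Int × Int) (t : Int) =>
        (acc.1 ++ [acc.2], acc.2 - g (t + s) + g (t + e)))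
      (res, ((PySem.List.pyRange s e 1).map (fun j => g (i + j))).sum)).1
      = res ++ (PySem.List.pyRange i n 1).map
          (fun t => ((PySem.List.pyRange s e 1).map (fun j => g (t + j))).sum) := by
  induction m with
  | zero =>
    intro i res hi
    rw [show PySem.List.pyRange i n 1 = [] from PySem.List.pyRange_one_eq_nil (by omega)]
    simp
  | succ m ih =>
    intro i res hi
    rw [show PySem.List.pyRange i n 1 = i :: PySem.List.pyRange (i + 1) n 1 from
      PySem.List.pyRange_one_cons (by omega)]
    rw [List.foldl_cons, List.map_cons]
    have hws : ((PySem.List.pyRange s e 1).map (fun j => g (i + j))).sum - g (i + s) + g (i + e)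
        = ((PySem.List.pyRange s e 1).map (fun j => g ((i + 1) + j))).sum := by
      rw [window_shift g s e i hse]
    dsimp only
    rw [hws, ih (i + 1) _ (by omega)]
    simp

theorem decrypt_op_eq_alt (code : List Int) (k : Int) (_hpre : code ≠ [] ∨ k = 0) :
    decrypt_op code k = decrypt_op_alt code k := by
  unfold decrypt_op decrypt_op_alt
  by_cases hk : k = 0
  · simp [hk]
  · simp only [if_neg hk]
    simp only [foldl_add_eq_sum]
    set n : Int := (code.length : Int) with hn
    set g : Int → Int := fun t => PySem.List.pyGetD code (PySem.Int.mod t n) 0 with hg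
    have hse : (if k > 0 then ((1 : Int), k + 1) else (k, 0)).1
        ≤ (if k > 0 then ((1 : Int), k + 1) else (k, 0)).2 := by
      split <;> simp <;> omega
    set s : Int := (if k > 0 then ((1 : Int), k + 1) else (k, 0)).1
    set e : Int := (if k > 0 then ((1 : Int), k + 1) else (k, 0)).2
    have hinit : ((PySem.List.pyRange s e 1).map (fun i => g i))
        = ((PySem.List.pyRange s e 1).map (fun j => g ((0 : Int) + j))) := by
      simp
    have h := loop_inv g s e n hse code.length 0 [] (by omega)
    have hjs : (if k > 0 then PySem.List.pyRange 1 (k + 1) 1 else PySem.List.pyRange k 0 1)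
        = PySem.List.pyRange s e 1 := by
      by_cases h0 : k > 0 <;> simp [s, e, h0]
    rw [hjs, hinit, h]
    simp only [List.nil_append]
    apply List.map_congr_left
    intro a _
    rfl

-- ===== VERDICT (by name: the statement is the Claim_ definition above) =====
theorem decrypt_op_spec : Claim_equal_decrypt_op := by
  intro code k _ hpre
  unfold Spec_decrypt_op
  exact decrypt_op_eq_alt code k hpre
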